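-- pv_equiv track=rewrite | github.com/robetr286/talk-electronics | talk_electronic/routes/textract.py | _parse_sequential_pins
-- ===== SOURCE A (Python) =====
-- from typing import Any, Dict, List, Optional, Tuple
--
-- def _parse_sequential_pins(text: str) -> Optional[List[int]]:
--     """Try to parse a digit-only string as consecutive pin numbers.
--
--     Returns a list of ints if the string is exactly the concatenation
--     of ascending consecutive integers starting from 1.
--     E.g. "12345678910" → [1, 2, 3, 4, 5, 6, 7, 8, 9, 10].
--     Returns None if the string does not match this pattern or has
--     fewer than 3 pins (too ambiguous — "12" could be the number 12).
--     """
--     pos = 0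
--     expected = 1
--     pins: List[int] = []
--     while pos < len(text):
--         s = str(expected)
--         if text[pos : pos + len(s)] == s:
--             pins.append(expected)
--             pos += len(s)
--             expected += 1
--         else:
--             return None
--     return pins if len(pins) >= 3 else None
-- ===== SOURCE B (Python) =====
-- from typing import List, Optional
--
-- def _parse_sequential_pins(text: str) -> Optional[List[int]]:
--     """Generate-then-verify: build the canonical concatenation of successive integers until it
--     is at least as long as text, then compare once."""
--     built = ""
--     i = 1
--     count = 0
--     while len(built) < len(text):
--         built += str(i)
--         count = i
--         i += 1
--     if built == text and count >= 3:
--         return list(range(1, count + 1))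
--     return None
-- ===== Notes on version B (the rewrite author's own statement) =====
-- stated objective: alternative
-- what changed: A incrementally matches each expected number at a moving position with per-step slice comparisons and early return; B generates the canonical concatenation of successive integers up to the needed length and does one whole-string equality check, deriving the pin list from the counter (trades A's early exit on a mismatch for a single comparison).
import Mathlib
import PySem

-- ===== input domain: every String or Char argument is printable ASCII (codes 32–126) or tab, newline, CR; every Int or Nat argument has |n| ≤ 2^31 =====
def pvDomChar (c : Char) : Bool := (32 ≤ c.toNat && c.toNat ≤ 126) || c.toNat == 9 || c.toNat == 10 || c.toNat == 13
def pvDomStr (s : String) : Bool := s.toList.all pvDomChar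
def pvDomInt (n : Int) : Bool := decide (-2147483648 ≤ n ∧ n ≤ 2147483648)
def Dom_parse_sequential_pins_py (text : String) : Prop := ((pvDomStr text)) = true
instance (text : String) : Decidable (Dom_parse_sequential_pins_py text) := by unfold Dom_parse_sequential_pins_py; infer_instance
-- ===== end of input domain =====

-- B builds the canonical concatenation of successive integers once and compares it to the input whole,
-- instead of A's incremental per-position slice matching (objective: alternative decomposition).

-- str(n) is never the empty string (cited by the termination proofs of both loop ports)
theorem pvToChars_ne_nil (n : Int) : PySem.Int.toChars n ≠ [] := by
  simp only [PySem.Int.toChars]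
  split
  · simp
  · have : 0 < (Nat.toDigits 10 n.toNat).length := Nat.length_toDigits_pos
    intro h
    simp [h] at this

-- ===== PORT A =====
-- while pos < len(text): s = str(expected); if text[pos:pos+len(s)] == s: append/advance else return None;
-- then: pins if len(pins) >= 3 else None
def pvALoop (cs : List Char) (pos expected : Int) (pins : List Int) : Option (List Int) :=
  if pos < (cs.length : Int) then
    let s := PySem.Int.toChars expected
    if PySem.List.slice cs (some pos) (some (pos + (s.length : Int))) = s then
      pvALoop cs (pos + (s.length : Int)) (expected + 1) (pins ++ [expected])
    else none
  else if 3 ≤ pins.length then some pins else none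
termination_by ((cs.length : Int) - pos).toNat
decreasing_by
  have h1 : (PySem.Int.toChars expected).length ≠ 0 :=
    fun h => pvToChars_ne_nil expected (List.length_eq_zero_iff.mp h)
  omega

def parse_sequential_pins_py (text : String) : Option (List Int) :=
  pvALoop text.toList 0 1 []

-- ===== PORT B =====
-- built=""; i=1; count=0; while len(built) < len(text): built += str(i); count = i; i += 1;
-- then: range(1, count+1) if built == text and count >= 3 else None
def pvBLoop (n : Nat) (built : List Char) (i count : Int) : List Char × Int :=
  if built.length < n then pvBLoop n (built ++ PySem.Int.toChars i) (i + 1) i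
  else (built, count)
termination_by n - built.length
decreasing_by
  have h1 : (PySem.Int.toChars i).length ≠ 0 :=
    fun h => pvToChars_ne_nil i (List.length_eq_zero_iff.mp h)
  simp only [List.length_append]
  omega

def parse_sequential_pins_py_alt (text : String) : Option (List Int) :=
  let r := pvBLoop text.toList.length [] 1 0
  if r.1 = text.toList ∧ 3 ≤ r.2 then some (PySem.List.pyRange 1 (r.2 + 1) 1) else none

-- ===== PRECONDITION & SPEC =====
def Spec_parse_sequential_pins_py (text : String) (out : Option (List Int)) : Prop := out = parse_sequential_pins_py_alt text
instance (text : String) (out : Option (List Int)) : Decidable (Spec_parse_sequential_pins_py text out) := by unfold Spec_parse_sequential_pins_py; infer_instance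

-- ===== CLAIM (what is proved, stated in full; the proofs are below) =====
def Claim_equal_parse_sequential_pins_py : Prop := ∀ (text : String), Dom_parse_sequential_pins_py text → Spec_parse_sequential_pins_py text (parse_sequential_pins_py text)

-- ===== LEMMAS AND PROOFS =====

def pvCat (a b : Int) : List Char :=
  ((PySem.List.pyRange a b 1).map PySem.Int.toChars).flatten
def pvMA (rest : List Char) (e : Int) : Option Int :=
  if rest = [] then some e
  else
    let s := PySem.Int.toChars e
    if rest.take s.length = s then pvMA (rest.drop s.length) (e + 1) else none
termination_by rest.length
decreasing_by
  have h1 : (PySem.Int.toChars e).length ≠ 0 :=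
    fun h => pvToChars_ne_nil e (List.length_eq_zero_iff.mp h)
  have h2 : rest.length ≠ 0 := by
    rename_i hr _; exact fun h => hr (List.length_eq_zero_iff.mp h)
  simp only [List.length_drop]
  omega

theorem pvCat_nil (a b : Int) (h : b ≤ a) : pvCat a b = [] := by
  simp [pvCat, PySem.List.pyRange_one_eq_nil h]

theorem pvCat_cons (a b : Int) (h : a < b) :
    pvCat a b = PySem.Int.toChars a ++ pvCat (a + 1) b := by
  rw [pvCat, PySem.List.pyRange_one_cons h]; simp [pvCat]

theorem pvCat_succ (a b : Int) (h : a ≤ b) :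
    pvCat a (b + 1) = pvCat a b ++ PySem.Int.toChars b := by
  rw [pvCat, PySem.List.pyRange_one_succ_right h]; simp [pvCat]

theorem pvCat_split (a b c : Int) (h1 : a ≤ b) (h2 : b ≤ c) :
    pvCat a c = pvCat a b ++ pvCat b c := by
  rw [pvCat, PySem.List.pyRange_one_append a b c h1 h2]; simp [pvCat]

theorem pvCat_len_lt (i m : Int) (h1 : 1 ≤ i) (h : i < m) :
    (pvCat 1 i).length < (pvCat 1 m).length := by
  rw [pvCat_split 1 i m h1 (le_of_lt h), List.length_append]
  have hne : (pvCat i m).length ≠ 0 := by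
    rw [pvCat_cons i m h, List.length_append]
    have : (PySem.Int.toChars i).length ≠ 0 :=
      fun h => pvToChars_ne_nil i (List.length_eq_zero_iff.mp h)
    omega
  omega

theorem pvMA_ge (rest : List Char) (e e' : Int) (h : pvMA rest e = some e') : e ≤ e' := by
  fun_induction pvMA rest e with
  | case1 => injection h with h; omega
  | case2 => rename_i ih; exact le_trans (by omega) (ih h)
  | case3 => cases h

theorem pvMA_cat (rest : List Char) (e e' : Int) (h : pvMA rest e = some e') :
    rest = pvCat e e' := by
  fun_induction pvMA rest e with
  | case1 e =>
      injection h with h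
      rw [h, pvCat_nil e' e' le_rfl]
  | case2 r e hnil s htake ih =>
      have hge : e + 1 ≤ e' := pvMA_ge _ _ _ h
      have hdrop := ih h
      rw [pvCat_cons e e' (by omega)]
      calc r = r.take s.length ++ r.drop s.length := (List.take_append_drop _ _).symm
        _ = PySem.Int.toChars e ++ pvCat (e + 1) e' := by rw [htake, hdrop]
  | case3 => cases h

theorem pvMA_cat_complete (e m : Int) (h : e ≤ m) : pvMA (pvCat e m) e = some m := by
  have H : ∀ (k : Nat) (e : Int), e ≤ m → (m - e).toNat = k → pvMA (pvCat e m) e = some m := by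
    intro k
    induction k with
    | zero =>
        intro e he hk
        have : e = m := by omega
        subst this
        rw [pvCat_nil e e le_rfl, pvMA]
        simp
    | succ n ihn =>
        intro e he hk
        have hlt : e < m := by omega
        rw [pvCat_cons e m hlt, pvMA]
        have hne : PySem.Int.toChars e ≠ [] := pvToChars_ne_nil e
        rw [if_neg (by simp [hne])]
        simp only [List.take_left', List.drop_left']
        exact ihn (e + 1) (by omega) (by omega)
  exact H (m - e).toNat e h rfl

theorem pvALoop_eq (cs : List Char) (p : Nat) (e : Int) (pins : List Int) (hp : p ≤ cs.length) :
    pvALoop cs (p : Int) e pins =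
      match pvMA (cs.drop p) e with
      | none => none
      | some e' =>
        if 3 ≤ (pins ++ PySem.List.pyRange e e' 1).length
        then some (pins ++ PySem.List.pyRange e e' 1) else none := by
  have H : ∀ (k : Nat) (p : Nat) (e : Int) (pins : List Int), p ≤ cs.length →
      cs.length - p = k →
      pvALoop cs (p : Int) e pins =
        match pvMA (cs.drop p) e with
        | none => none
        | some e' =>
          if 3 ≤ (pins ++ PySem.List.pyRange e e' 1).length
          then some (pins ++ PySem.List.pyRange e e' 1) else none := by
    intro k
    induction k using Nat.strong_induction_on with
    | _ k ih =>
      intro p e pins hp hk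
      by_cases hlt : p < cs.length
      · -- loop body runs
        rw [pvALoop, if_pos (by exact_mod_cast hlt)]
        have hrest : cs.drop p ≠ [] := by
          intro h
          have := List.length_drop (l := cs) (i := p)
          rw [h] at this
          simp at this
          omega
        rw [pvMA, if_neg hrest]
        simp only [PySem.List.slice_natCast_add]
        set s := PySem.Int.toChars e with hs
        by_cases htake : (cs.drop p).take s.length = s
        · rw [if_pos htake, if_pos htake]
          have hsne : s.length ≠ 0 :=
            fun h => pvToChars_ne_nil e (List.length_eq_zero_iff.mp h)
          have hLle : s.length ≤ cs.length - p := by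
            have := congrArg List.length htake
            simp [List.length_take, List.length_drop] at this
            omega
          have hcast : (p : Int) + (s.length : Int) = ((p + s.length : Nat) : Int) := by push_cast; ring
          rw [hcast]
          have hrec := ih (cs.length - (p + s.length)) (by omega) (p + s.length) (e + 1)
            (pins ++ [e]) (by omega) rfl
          rw [hrec]
          have hdd : cs.drop (p + s.length) = (cs.drop p).drop s.length := by
            rw [List.drop_drop]
          rw [hdd]
          cases hma : pvMA ((cs.drop p).drop s.length) (e + 1) with
          | none => simp
          | some e' =>
            have he' : e + 1 ≤ e' := pvMA_ge _ _ _ hma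
            simp only []
            rw [PySem.List.pyRange_one_cons (a := e) (b := e') (by omega)]
            simp [List.append_assoc]
        · rw [if_neg htake, if_neg htake]
      · -- loop exits
        rw [pvALoop, if_neg (by exact_mod_cast hlt)]
        have : cs.drop p = [] := by
          apply List.drop_eq_nil_of_le; omega
        rw [this, pvMA, if_pos rfl]
        simp [PySem.List.pyRange_one_eq_nil (le_refl e)]
  exact H (cs.length - p) p e pins hp rfl

theorem pvBLoop_hits (m : Int) (i : Int) (h1 : 1 ≤ i) (hm : i ≤ m) :
    pvBLoop (pvCat 1 m).length (pvCat 1 i) i (i - 1) = (pvCat 1 m, m - 1) := by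
  have H : ∀ (k : Nat) (i : Int), 1 ≤ i → i ≤ m → (m - i).toNat = k →
      pvBLoop (pvCat 1 m).length (pvCat 1 i) i (i - 1) = (pvCat 1 m, m - 1) := by
    intro k
    induction k with
    | zero =>
      intro i h1 hm hk
      have : i = m := by omega
      subst this
      rw [pvBLoop, if_neg (lt_irrefl _)]
    | succ n ihn =>
      intro i h1 hm hk
      have hlt : i < m := by omega
      rw [pvBLoop, if_pos (pvCat_len_lt i m h1 hlt)]
      rw [← pvCat_succ 1 i h1]
      simpa using ihn (i + 1) (by omega) (by omega) (by omega)
  exact H (m - i).toNat i h1 hm rfl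

theorem pvBLoop_shape (n : Nat) (i : Int) (h1 : 1 ≤ i) :
    ∃ m, i ≤ m ∧ pvBLoop n (pvCat 1 i) i (i - 1) = (pvCat 1 m, m - 1) := by
  have H : ∀ (k : Nat) (i : Int), 1 ≤ i → n - (pvCat 1 i).length = k →
      ∃ m, i ≤ m ∧ pvBLoop n (pvCat 1 i) i (i - 1) = (pvCat 1 m, m - 1) := by
    intro k
    induction k using Nat.strong_induction_on with
    | _ k ih =>
      intro i h1 hk
      by_cases hlt : (pvCat 1 i).length < n
      · rw [pvBLoop, if_pos hlt]
        rw [← pvCat_succ 1 i h1]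
        have hgrow : (pvCat 1 i).length < (pvCat 1 (i + 1)).length :=
          pvCat_len_lt i (i + 1) h1 (by omega)
        obtain ⟨m, hm1, hm2⟩ := ih (n - (pvCat 1 (i + 1)).length) (by omega) (i + 1) (by omega) rfl
        refine ⟨m, by omega, ?_⟩
        simpa using hm2
      · rw [pvBLoop, if_neg hlt]
        exact ⟨i, le_rfl, rfl⟩
  exact H (n - (pvCat 1 i).length) i h1 rfl

-- ===== VERDICT (by name: the statement is the Claim_ definition above) =====
theorem parse_sequential_pins_py_spec : Claim_equal_parse_sequential_pins_py := by
  intro text _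
  unfold Spec_parse_sequential_pins_py
  unfold parse_sequential_pins_py parse_sequential_pins_py_alt
  have hA := pvALoop_eq text.toList 0 1 [] (Nat.zero_le _)
  simp only [Nat.cast_zero, List.drop_zero] at hA
  rw [hA]
  have hnil : pvCat 1 1 = [] := pvCat_nil 1 1 le_rfl
  have h0 : (1 : Int) - 1 = 0 := by norm_num
  cases hma : pvMA text.toList 1 with
  | some e' =>
    have he1 : 1 ≤ e' := pvMA_ge _ _ _ hma
    have hcs : text.toList = pvCat 1 e' := pvMA_cat _ _ _ hma
    have hb := pvBLoop_hits e' 1 le_rfl he1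
    rw [hnil, h0] at hb
    rw [hcs]
    simp only [hb, List.nil_append, PySem.List.length_pyRange_one]
    by_cases hge : 3 ≤ e' - 1
    · rw [if_pos (by omega), if_pos ⟨trivial, hge⟩]
      norm_num
    · rw [if_neg (by omega), if_neg (by intro h; exact hge h.2)]
  | none =>
    obtain ⟨m, hm1, hb⟩ := pvBLoop_shape text.toList.length 1 le_rfl
    rw [hnil, h0] at hb
    simp only [hb]
    rw [if_neg]
    intro h
    have hcs : pvCat 1 m = text.toList := h.1
    have := pvMA_cat_complete 1 m hm1
    rw [hcs, hma] at this
    cases this
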